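-- pv_equiv track=rewrite | github.com/ainaosyusi/ofc-pineapple-ai | scripts/test_foul_comparison.py | _eval_3_no_joker
-- ===== SOURCE A (Python) =====
-- def _eval_3_no_joker(cards):
--     """3枚ハンド評価（Jokerなし）"""
--     ranks = sorted([r for r, s in cards], reverse=True)
--     from collections import Counter
--     rank_counts = Counter(ranks)
--     count_groups = sorted(rank_counts.items(), key=lambda x: (x[1], x[0]), reverse=True)
--
--     if count_groups[0][1] == 3:
--         return (3, [count_groups[0][0]])  # Three of a Kind
--
--     if count_groups[0][1] == 2:
--         pair_rank = count_groups[0][0]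
--         kicker = [r for r in ranks if r != pair_rank][0]
--         return (1, [pair_rank, kicker])  # One Pair
--
--     return (0, ranks)  # High Card
-- ===== SOURCE B (Python) =====
-- def _eval_3_no_joker(cards):
--     """Hand rank via a single run-length scan over the descending-sorted ranks
--     (runs of equal ranks are adjacent once sorted, so the longest/highest run
--     is found in one pass, without a frequency table)."""
--     ranks = sorted((r for r, s in cards), reverse=True)
--     best_len, best_rank, run, prev = 0, None, 0, None
--     for r in ranks:
--         run = run + 1 if prev == r else 1
--         prev = r
--         if run > best_len:
--             best_len, best_rank = run, r
--     if best_len == 3: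
--         return (3, [best_rank])  # Three of a Kind
--     if best_len == 2:
--         kicker = next(x for x in ranks if x != best_rank)
--         return (1, [best_rank, kicker])  # One Pair
--     return (0, ranks)  # High Card
-- ===== Notes on version B (the rewrite author's own statement) =====
-- stated objective: alternative
-- what changed: Replaces the Counter frequency table and the (count,rank)-keyed sort of its items by a single run-length scan over the descending-sorted ranks (equal ranks are adjacent after sorting), tracking the best (length, rank) run.
import Mathlib
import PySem

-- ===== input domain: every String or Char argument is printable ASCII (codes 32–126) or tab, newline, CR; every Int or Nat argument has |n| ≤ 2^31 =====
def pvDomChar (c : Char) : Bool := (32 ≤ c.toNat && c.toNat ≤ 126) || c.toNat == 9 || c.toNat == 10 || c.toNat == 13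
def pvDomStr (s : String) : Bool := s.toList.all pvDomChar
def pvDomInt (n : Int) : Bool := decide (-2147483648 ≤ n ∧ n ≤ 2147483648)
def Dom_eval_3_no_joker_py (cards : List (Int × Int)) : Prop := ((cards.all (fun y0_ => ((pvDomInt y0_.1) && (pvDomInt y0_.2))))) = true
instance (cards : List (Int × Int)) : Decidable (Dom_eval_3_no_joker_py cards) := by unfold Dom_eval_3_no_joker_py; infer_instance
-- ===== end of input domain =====

-- ===== PORT A =====
-- B replaces A's Counter frequency table and the (count,rank)-keyed sort of its items by a
-- single run-length scan over the descending-sorted ranks (objective: alternative algorithm).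
def eval_3_no_joker_py (cards : List (Int × Int)) : Int × List Int :=
  let ranks := PySem.List.sorted (cards.map (fun c => c.1)) (fun r => r) true
  let rank_counts := PySem.Dict.counter ranks
  let count_groups := PySem.List.sorted2 rank_counts.items (fun x => x.2) (fun x => x.1) true
  match PySem.List.pyGet? count_groups 0 with
  | none => (0, [])  -- count_groups[0] raises IndexError on an empty hand: outside Pre_
  | some g0 =>
    if g0.2 = 3 then (3, [g0.1])
    else if g0.2 = 2 then
      let pair_rank := g0.1
      match PySem.List.pyGet? (ranks.filter (fun r => !(r == pair_rank))) 0 with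
      | none => (0, [])  -- kicker [...][0] raises IndexError (a bare equal pair): outside Pre_
      | some kicker => (1, [pair_rank, kicker])
    else (0, ranks)

-- ===== PORT B =====
-- loop body of B's scan: state is (best_len, best_rank, run, prev)
def bstep (s : Int × Option Int × Int × Option Int) (r : Int) : Int × Option Int × Int × Option Int :=
  let run : Int := if s.2.2.2 = some r then s.2.2.1 + 1 else 1
  if s.1 < run then (run, some r, run, some r) else (s.1, s.2.1, run, some r)

def eval_3_no_joker_py_alt (cards : List (Int × Int)) : Int × List Int :=
  let ranks := PySem.List.sorted (cards.map (fun c => c.1)) (fun r => r) true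
  let st := ranks.foldl bstep (0, none, 0, none)
  if st.1 = 3 then (3, [st.2.1.getD 0])      -- best_rank is always set when best_len ≥ 1
  else if st.1 = 2 then
    match ranks.find? (fun x => !(x == st.2.1.getD 0)) with
    | none => (0, [])  -- next() raises StopIteration (a bare equal pair): outside Pre_
    | some kicker => (1, [st.2.1.getD 0, kicker])
  else (0, ranks)

-- ===== PRECONDITION & SPEC =====
-- Pre_ excludes exactly the inputs on which A raises IndexError: the empty hand
-- (count_groups[0]) and a two-card hand of equal ranks (the kicker lookup [..][0] is empty).
def Pre_eval_3_no_joker_py (cards : List (Int × Int)) : Prop :=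
  cards ≠ [] ∧
    ¬(cards.length = 2 ∧ (cards.map (fun c => c.1))[0]? = (cards.map (fun c => c.1))[1]?)
instance (cards : List (Int × Int)) : Decidable (Pre_eval_3_no_joker_py cards) := by
  unfold Pre_eval_3_no_joker_py; infer_instance
def pvWitness_eval_3_no_joker_py : (List (Int × Int)) := [(5, 0), (5, 1), (3, 2)]

def Spec_eval_3_no_joker_py (cards : List (Int × Int)) (out : Int × List Int) : Prop := out = eval_3_no_joker_py_alt cards
instance (cards : List (Int × Int)) (out : Int × List Int) : Decidable (Spec_eval_3_no_joker_py cards out) := by unfold Spec_eval_3_no_joker_py; infer_instance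

-- ===== CLAIM (what is proved, stated in full; the proofs are below) =====
def Claim_equal_eval_3_no_joker_py : Prop := ∀ (cards : List (Int × Int)), Dom_eval_3_no_joker_py cards → Pre_eval_3_no_joker_py cards → Spec_eval_3_no_joker_py cards (eval_3_no_joker_py cards)

-- ===== LEMMAS AND PROOFS =====

-- "(rank a, count a) is lex-below (rank b, count b)": count first, rank as tie-break.
def lexLe (a b : Int × Int) : Prop := a.2 < b.2 ∨ (a.2 = b.2 ∧ a.1 ≤ b.1)

-- the comparator sorted2 (key = (count, rank), reverse=True) uses
def befA (a b : Int × Int) : Bool :=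
  decide (b.2 < a.2) || (!decide (a.2 < b.2) && decide (b.1 < a.1))

theorem sorted2_items_eq (xs : List (Int × Int)) :
    PySem.List.sorted2 xs (fun x => x.2) (fun x => x.1) true
      = xs.foldl (fun acc x => PySem.List.insertBy befA x acc) [] := rfl

theorem befA_false {a b : Int × Int} (h : befA a b = false) : lexLe a b := by
  simp [befA, decide_eq_false_iff_not] at h; unfold lexLe; omega

theorem befA_true {a b : Int × Int} (h : befA a b = true) : lexLe b a := by
  simp [befA] at h; unfold lexLe; omega

theorem lexLe_refl (a : Int × Int) : lexLe a a := by unfold lexLe; omega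

theorem lexLe_trans {a b c : Int × Int} (h1 : lexLe a b) (h2 : lexLe b c) : lexLe a c := by
  unfold lexLe at *; omega

theorem lexLe_antisymm {a b : Int × Int} (h1 : lexLe a b) (h2 : lexLe b a) : a = b := by
  unfold lexLe at *
  have : a.1 = b.1 ∧ a.2 = b.2 := by omega
  exact Prod.ext this.1 this.2

theorem mem_insertBy_befA {y x : Int × Int} {ys : List (Int × Int)}
    (h : y ∈ PySem.List.insertBy befA x ys) : y = x ∨ y ∈ ys :=
  (PySem.List.mem_insertBy befA x y ys).mp h

theorem pairwise_insertBy (x : Int × Int) (ys : List (Int × Int))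
    (h : ys.Pairwise (fun p q => lexLe q p)) :
    (PySem.List.insertBy befA x ys).Pairwise (fun p q => lexLe q p) := by
  induction ys with
  | nil => simp [PySem.List.insertBy]
  | cons y ys ih =>
    rw [List.pairwise_cons] at h
    rw [PySem.List.insertBy]
    by_cases hb : befA x y = true
    · rw [if_pos hb]
      refine List.Pairwise.cons ?_ (List.Pairwise.cons h.1 h.2)
      intro z hz
      rcases List.mem_cons.mp hz with hz | hz
      · exact hz ▸ befA_true hb
      · exact lexLe_trans (h.1 z hz) (befA_true hb)
    · rw [if_neg hb]
      refine List.Pairwise.cons ?_ (ih h.2)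
      intro z hz
      rcases mem_insertBy_befA hz with hz | hz
      · exact hz ▸ befA_false (Bool.not_eq_true _ ▸ hb)
      · exact h.1 z hz

theorem pairwise_foldl (xs acc : List (Int × Int))
    (h : acc.Pairwise (fun p q => lexLe q p)) :
    (xs.foldl (fun acc x => PySem.List.insertBy befA x acc) acc).Pairwise (fun p q => lexLe q p) := by
  induction xs generalizing acc with
  | nil => exact h
  | cons y ys ih => exact ih _ (pairwise_insertBy y acc h)

-- A's count_groups: nonempty, and its head is the lex-max (count, rank) item
theorem A_groups (rs : List Int) (hne : rs ≠ []) :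
    ∃ g t, PySem.List.sorted2 (PySem.Dict.counter rs).items (fun x => x.2) (fun x => x.1) true
        = g :: t
      ∧ g.1 ∈ rs ∧ g.2 = (rs.count g.1 : Int)
      ∧ ∀ r ∈ rs, lexLe (r, (rs.count r : Int)) g := by
  have hperm : (PySem.List.sorted2 (PySem.Dict.counter rs).items
      (fun x => x.2) (fun x => x.1) true).Perm (PySem.Dict.counter rs).items :=
    PySem.List.sorted2_perm _ _ _ _
  have hitems := PySem.Dict.items_counter rs
  have hpw : (PySem.List.sorted2 (PySem.Dict.counter rs).items
      (fun x => x.2) (fun x => x.1) true).Pairwise (fun p q => lexLe q p) := by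
    rw [sorted2_items_eq]
    exact pairwise_foldl _ _ List.Pairwise.nil
  -- the sorted list is nonempty
  obtain ⟨r0, rs', hrs⟩ := List.exists_cons_of_ne_nil hne
  have hmem0 : (r0, (rs.count r0 : Int)) ∈ (PySem.Dict.counter rs).items := by
    rw [hitems]
    exact List.mem_map.mpr ⟨r0, (PySem.Set.mem_ofList rs r0).mpr (by simp [hrs]), rfl⟩
  rcases hL : PySem.List.sorted2 (PySem.Dict.counter rs).items
      (fun x => x.2) (fun x => x.1) true with _ | ⟨g, t⟩
  · exact absurd (hperm.mem_iff.mpr hmem0) (by simp [hL])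
  · refine ⟨g, t, rfl, ?_, ?_, ?_⟩
    all_goals
      have hg : g ∈ (PySem.Dict.counter rs).items := hperm.mem_iff.mp (by simp [hL])
      rw [hitems] at hg
      obtain ⟨k, hk, hgk⟩ := List.mem_map.mp hg
      have hkrs : k ∈ rs := (PySem.Set.mem_ofList rs k).mp hk
    · rw [← hgk]; exact hkrs
    · rw [← hgk]
    · intro r hr
      have hmem : (r, (rs.count r : Int)) ∈ (PySem.Dict.counter rs).items := by
        rw [hitems]
        exact List.mem_map.mpr ⟨r, (PySem.Set.mem_ofList rs r).mpr hr, rfl⟩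
      have := hperm.mem_iff.mpr hmem
      rw [hL] at this hpw
      rcases List.mem_cons.mp this with h | h
      · exact h ▸ lexLe_refl g
      · exact (List.pairwise_cons.mp hpw).1 _ h

-- in a weakly descending list, a minimal member sits at the end
theorem last_eq_of_mem_min (p : List Int) (r : Int) (hp : p.Pairwise (fun a b => b ≤ a))
    (hmin : ∀ x ∈ p, r ≤ x) (hr : r ∈ p) : p.getLast? = some r := by
  induction p with
  | nil => cases hr
  | cons y ys ih =>
    rcases List.pairwise_cons.mp hp with ⟨hy, hys⟩
    cases hys' : ys with
    | nil =>
      subst hys'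
      rcases List.mem_singleton.mp hr with rfl
      rfl
    | cons z zs =>
      subst hys'
      rw [List.getLast?_cons_cons]
      refine ih hys (fun x hx => hmin x (List.mem_cons_of_mem _ hx)) ?_
      rcases List.mem_cons.mp hr with rfl | hr'
      · -- r = y but ys nonempty: every element of ys equals r
        have hz : z ∈ z :: zs := List.mem_cons_self
        have h1 : z ≤ r := hy z hz
        have h2 : r ≤ z := hmin z (List.mem_cons_of_mem _ hz)
        have : z = r := le_antisymm h1 h2
        rw [← this]; exact hz
      · exact hr'

-- the full loop invariant of B's scan
theorem B_loop_inv (rs : List Int) (hs : rs.Pairwise (fun a b => b ≤ a)) :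
    (rs.foldl bstep (0, none, 0, none)).2.2.2 = rs.getLast?
    ∧ (∀ x, rs.getLast? = some x →
        (rs.foldl bstep (0, none, 0, none)).2.2.1 = (rs.count x : Int))
    ∧ (rs = [] → rs.foldl bstep (0, none, 0, none) = (0, none, 0, none))
    ∧ (rs ≠ [] → ∃ b, (rs.foldl bstep (0, none, 0, none)).2.1 = some b
        ∧ b ∈ rs ∧ (rs.foldl bstep (0, none, 0, none)).1 = (rs.count b : Int)
        ∧ ∀ r ∈ rs, lexLe (r, (rs.count r : Int)) (b, (rs.count b : Int))) := by
  induction rs using List.reverseRecOn with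
  | nil => simp
  | append_singleton p r ih =>
    have hsp : p.Pairwise (fun a b => b ≤ a) := (List.pairwise_append.mp hs).1
    have hmin : ∀ x ∈ p, r ≤ x :=
      fun x hx => (List.pairwise_append.mp hs).2.2 x hx r (List.mem_singleton.mpr rfl)
    obtain ⟨hprev, hrun, hnil, hcons⟩ := ih hsp
    have hcount : ∀ x : Int, (p ++ [r]).count x = p.count x + if x = r then 1 else 0 := by
      intro x
      by_cases hx : x = r
      · subst hx; simp [List.count_append]
      · simp [List.count_append, Ne.symm hx, hx]
    have hfold : (p ++ [r]).foldl bstep (0, none, 0, none)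
        = bstep (p.foldl bstep (0, none, 0, none)) r := by
      rw [List.foldl_append]; rfl
    set st := p.foldl bstep (0, none, 0, none) with hst
    -- the new run length is the count of r in p ++ [r]
    have hrun' : (if st.2.2.2 = some r then st.2.2.1 + 1 else 1)
        = (((p ++ [r]).count r : Nat) : Int) := by
      by_cases hpr : st.2.2.2 = some r
      · rw [if_pos hpr]
        have hlast : p.getLast? = some r := hprev ▸ hpr
        have := hrun r hlast
        rw [this, hcount r, if_pos rfl]
        push_cast; ring
      · rw [if_neg hpr]
        have hnotmem : r ∉ p := by
          intro hmem
          exact hpr (hprev.trans (last_eq_of_mem_min p r hsp hmin hmem))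
        rw [hcount r, if_pos rfl, List.count_eq_zero.mpr hnotmem]
        simp
    have hlast' : (p ++ [r]).getLast? = some r := by simp
    refine ⟨?_, ?_, ?_, ?_⟩
    · rw [hfold]; unfold bstep; rw [hlast']
      by_cases h : st.1 < (if st.2.2.2 = some r then st.2.2.1 + 1 else 1) <;> simp [h]
    · intro x hx
      rw [hlast'] at hx
      injection hx with hx; subst hx
      rw [hfold]; unfold bstep; rw [← hrun']
      by_cases h : st.1 < (if st.2.2.2 = some r then st.2.2.1 + 1 else 1) <;> simp [h]
    · intro h; exact absurd h (by simp)
    · intro _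
      rw [hfold]; unfold bstep
      by_cases hlt : st.1 < (if st.2.2.2 = some r then st.2.2.1 + 1 else 1)
      · -- the run ending at r becomes the new best
        refine ⟨r, by simp [hlt], by simp, by simpa [hlt] using hrun', ?_⟩
        intro x hx
        rcases List.mem_append.mp hx with hxp | hxr
        · by_cases hxr' : x = r
          · subst hxr'; exact lexLe_refl _
          · have hpne : p ≠ [] := List.ne_nil_of_mem hxp
            obtain ⟨b0, hb0some, hb0mem, hb0len, hb0all⟩ := hcons hpne
            have hx' := hb0all x hxp
            have hcx : (p ++ [r]).count x = p.count x := by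
              rw [hcount x, if_neg hxr']; ring
            have hcr : (((p ++ [r]).count r : Nat) : Int)
                = (if st.2.2.2 = some r then st.2.2.1 + 1 else 1) := hrun'.symm
            unfold lexLe at hx' ⊢
            dsimp only at hx' ⊢
            rw [hcx]
            omega
        · rcases List.mem_singleton.mp hxr with rfl
          exact lexLe_refl _
      · -- old best survives
        have hpne : p ≠ [] := by
          intro hpe
          have hst0 : st = (0, none, 0, none) := by rw [hst, hpe]; rfl
          rw [hst0] at hlt
          simp at hlt
        obtain ⟨b0, hb0some, hb0mem, hb0len, hb0all⟩ := hcons hpne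
        have hb0r : b0 ≠ r := by
          intro hbr
          subst hbr
          have hmem : b0 ∈ p := hb0mem
          have hlast : p.getLast? = some b0 := last_eq_of_mem_min p b0 hsp hmin hmem
          have hprev' : st.2.2.2 = some b0 := hprev.trans hlast
          have := hrun b0 hlast
          apply hlt
          rw [if_pos hprev', this, ← hb0len]
          omega
        have hcb0 : (p ++ [r]).count b0 = p.count b0 := by
          rw [hcount b0, if_neg hb0r]; ring
        refine ⟨b0, by simp [hlt, hb0some], List.mem_append_left _ hb0mem, ?_, ?_⟩
        · simp only [hlt, if_false]
          rw [hcb0]; exact hb0len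
        · intro x hx
          by_cases hx' : x = r
          · subst hx'
            have h1 : (((p ++ [x]).count x : Nat) : Int)
                = (if st.2.2.2 = some x then st.2.2.1 + 1 else 1) := hrun'.symm
            have h2 : x ≤ b0 := hmin b0 hb0mem
            unfold lexLe
            dsimp only
            rw [hcb0]
            omega
          · rcases List.mem_append.mp hx with hxp | hxr2
            · have hcx : (p ++ [r]).count x = p.count x := by
                rw [hcount x, if_neg hx']; ring
              have := hb0all x hxp
              unfold lexLe at this ⊢
              dsimp only at this ⊢
              rw [hcx, hcb0]
              exact this
            · exact absurd (List.mem_singleton.mp hxr2) hx'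

-- B's scan: on a descending-sorted nonempty list the final state holds the lex-max (count, rank)
theorem B_loop (rs : List Int) (hs : rs.Pairwise (fun a b => b ≤ a)) (hne : rs ≠ []) :
    ∃ b, (rs.foldl bstep (0, none, 0, none)).2.1 = some b
      ∧ b ∈ rs ∧ (rs.foldl bstep (0, none, 0, none)).1 = (rs.count b : Int)
      ∧ ∀ r ∈ rs, lexLe (r, (rs.count r : Int)) (b, (rs.count b : Int)) :=
  (B_loop_inv rs hs).2.2.2 hne

theorem pyGet?_zero {α : Type} (xs : List α) : PySem.List.pyGet? xs 0 = xs.head? := by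
  cases xs <;> simp [PySem.List.pyGet?, PySem.List.pyIdx?]

theorem head?_filter_eq_find? {α : Type} (p : α → Bool) (xs : List α) :
    (xs.filter p).head? = xs.find? p := by
  induction xs with
  | nil => rfl
  | cons y ys ih => by_cases h : p y <;> simp [h, ih]

-- ===== VERDICT (by name: the statement is the Claim_ definition above) =====
theorem eval_3_no_joker_py_spec : Claim_equal_eval_3_no_joker_py := by
  intro cards _hd hp
  unfold Pre_eval_3_no_joker_py at hp
  obtain ⟨hne, _⟩ := hp
  unfold Spec_eval_3_no_joker_py eval_3_no_joker_py eval_3_no_joker_py_alt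
  dsimp only
  set rs := PySem.List.sorted (cards.map (fun c => c.1)) (fun r => r) true with hrs
  have hrsne : rs ≠ [] := by
    intro h
    rw [hrs] at h
    exact hne (List.map_eq_nil_iff.mp ((PySem.List.sorted_eq_nil_iff _ _ _).mp h))
  have hsort : rs.Pairwise (fun a b => b ≤ a) :=
    PySem.List.sorted_pairwise_rev (cards.map (fun c => c.1)) (fun r => r)
  obtain ⟨g, t, hL, hgmem, hgcnt, hgall⟩ := A_groups rs hrsne
  obtain ⟨b, hbsome, hbmem, hblen, hball⟩ := B_loop rs hsort hrsne
  have hg_eq : g = (b, (rs.count b : Int)) := by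
    have hg' : (g.1, (rs.count g.1 : Int)) = g := by
      rw [← hgcnt]
    refine lexLe_antisymm ?_ (hgall b hbmem)
    rw [← hg']
    exact hball g.1 hgmem
  rw [hL, hbsome, hblen]
  rw [pyGet?_zero, List.head?_cons]
  dsimp only [Option.getD]
  rw [hg_eq]
  dsimp only
  by_cases c3 : (rs.count b : Int) = 3
  · rw [if_pos c3, if_pos c3]
  · rw [if_neg c3, if_neg c3]
    by_cases c2 : (rs.count b : Int) = 2
    · rw [if_pos c2, if_pos c2]
      rw [pyGet?_zero, head?_filter_eq_find?]
    · simp only [if_neg c2]
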